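-- pv_equiv track=rewrite | github.com/CommitHu502Craft/SoftDoc-Pipeline | modules/ui_skill_orchestrator.py | _pick_chart_types
-- ===== SOURCE A (Python) =====
-- from typing import Any, Dict, List, Optional, Tuple
--
-- ARCHETYPE_CHART_TYPES: Dict[str, List[str]] = {
--     "workflow": ["line", "bar", "funnel", "heatmap", "gauge"],
--     "operations": ["line", "heatmap", "scatter", "bar", "gauge"],
--     "knowledge": ["bar", "treemap", "line", "scatter", "pie"],
--     "relationship": ["funnel", "bar", "line", "sankey", "pie"],
--     "reporting": ["bar", "line", "pie", "scatter", "heatmap"],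
--     "generic": ["bar", "line", "pie", "scatter", "heatmap"],
-- }
--
-- def _pick_chart_types(archetype: str, count: int, seed: int) -> List[str]:
--     pool = ARCHETYPE_CHART_TYPES.get(archetype, ARCHETYPE_CHART_TYPES["generic"])
--     if not pool:
--         return []
--     result: List[str] = []
--     idx = seed % len(pool)
--     for _ in range(max(1, int(count))):
--         result.append(pool[idx % len(pool)])
--         idx += 1
--     deduped: List[str] = []
--     for item in result:
--         if item not in deduped:
--             deduped.append(item)
--     return deduped
-- ===== SOURCE B (Python) =====
-- from typing import Dict, List
--
-- ARCHETYPE_CHART_TYPES: Dict[str, List[str]] = {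
--     "workflow": ["line", "bar", "funnel", "heatmap", "gauge"],
--     "operations": ["line", "heatmap", "scatter", "bar", "gauge"],
--     "knowledge": ["bar", "treemap", "line", "scatter", "pie"],
--     "relationship": ["funnel", "bar", "line", "sankey", "pie"],
--     "reporting": ["bar", "line", "pie", "scatter", "heatmap"],
--     "generic": ["bar", "line", "pie", "scatter", "heatmap"],
-- }
--
-- def _pick_chart_types(archetype: str, count: int, seed: int) -> List[str]:
--     # Each pool holds distinct entries, so cycling then deduping is just the
--     # rotation of the pool truncated to min(max(1, count), len(pool)) items.
--     pool = ARCHETYPE_CHART_TYPES.get(archetype, ARCHETYPE_CHART_TYPES["generic"])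
--     start = seed % len(pool)
--     k = min(max(1, int(count)), len(pool))
--     rotated = pool[start:] + pool[:start]
--     return rotated[:k]
-- ===== Notes on version B (the rewrite author's own statement) =====
-- stated objective: faster
-- what changed: Replaced the O(count) append loop plus quadratic dedup pass by a closed-form rotation: slice the pool at seed % len and truncate to min(max(1,count), len(pool)), valid because each pool has distinct entries.
import Mathlib
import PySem

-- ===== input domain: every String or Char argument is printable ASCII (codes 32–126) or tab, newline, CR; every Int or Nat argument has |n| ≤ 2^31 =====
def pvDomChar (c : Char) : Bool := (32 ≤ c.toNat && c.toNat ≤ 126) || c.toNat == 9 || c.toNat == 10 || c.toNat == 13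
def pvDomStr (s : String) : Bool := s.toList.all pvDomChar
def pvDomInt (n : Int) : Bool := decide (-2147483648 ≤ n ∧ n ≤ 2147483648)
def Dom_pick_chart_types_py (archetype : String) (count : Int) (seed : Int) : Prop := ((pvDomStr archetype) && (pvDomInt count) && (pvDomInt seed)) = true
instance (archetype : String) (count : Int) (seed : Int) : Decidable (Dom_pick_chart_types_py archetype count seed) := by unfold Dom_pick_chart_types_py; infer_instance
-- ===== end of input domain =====

-- B replaces A's O(count) cycle-and-append loop plus quadratic dedup pass by a closed-form
-- rotation of the pool truncated to min(max(1,count), len(pool)) (valid because every pool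
-- in the table has distinct entries): faster.

-- shared module constant ARCHETYPE_CHART_TYPES
def pvPools : PySem.Dict String (List String) := PySem.Dict.mk
  [("workflow", ["line", "bar", "funnel", "heatmap", "gauge"]),
   ("operations", ["line", "heatmap", "scatter", "bar", "gauge"]),
   ("knowledge", ["bar", "treemap", "line", "scatter", "pie"]),
   ("relationship", ["funnel", "bar", "line", "sankey", "pie"]),
   ("reporting", ["bar", "line", "pie", "scatter", "heatmap"]),
   ("generic", ["bar", "line", "pie", "scatter", "heatmap"])]

-- shared first line of both Pythons: ARCHETYPE_CHART_TYPES.get(archetype, ARCHETYPE_CHART_TYPES["generic"])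
-- ("generic" is a key of the dict, so the inner [] lookup never raises; its port is total via .getD [])
def pvPool (archetype : String) : List String :=
  PySem.Dict.getD pvPools archetype ((PySem.Dict.get? pvPools "generic").getD [])

-- ===== PORT A =====
-- A's for-loop as tail recursion on the remaining iteration count, carrying idx and the
-- result accumulator (result.append(...) modelled by a reversed accumulator, reversed once at the end);
-- pool[idx % len(pool)] via pyGetD (the index is always in [0, len), so the default "" is never used)
def pickLoopA (pool : List String) (idx : Int) : Nat → List String → List String
  | 0, res => res
  | m + 1, res => pickLoopA pool (idx + 1) m
      (PySem.List.pyGetD pool (PySem.Int.mod idx (PySem.List.len pool)) "" :: res)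

-- A's dedup loop: for item in result: if item not in deduped: deduped.append(item)
def dedupA (ded : List String) : List String → List String
  | [] => ded
  | x :: xs => dedupA (if x ∈ ded then ded else ded ++ [x]) xs

def pick_chart_types_py (archetype : String) (count : Int) (seed : Int) : List String :=
  let pool := pvPool archetype
  if pool = [] then []
  else
    dedupA [] (pickLoopA pool (PySem.Int.mod seed (PySem.List.len pool)) (max 1 count).toNat []).reverse

-- ===== PORT B =====
def pick_chart_types_py_alt (archetype : String) (count : Int) (seed : Int) : List String :=
  let pool := pvPool archetype
  let start := PySem.Int.mod seed (PySem.List.len pool)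
  let k := min (max 1 count) (PySem.List.len pool)
  let rotated := PySem.List.slice pool (some start) none ++ PySem.List.slice pool none (some start)
  PySem.List.slice rotated none (some k)

-- ===== PRECONDITION & SPEC =====
def Spec_pick_chart_types_py (archetype : String) (count : Int) (seed : Int) (out : List String) : Prop := out = pick_chart_types_py_alt archetype count seed
instance (archetype : String) (count : Int) (seed : Int) (out : List String) : Decidable (Spec_pick_chart_types_py archetype count seed out) := by unfold Spec_pick_chart_types_py; infer_instance

-- ===== CLAIM (what is proved, stated in full; the proofs are below) =====
def Claim_equal_pick_chart_types_py : Prop := ∀ (archetype : String) (count : Int) (seed : Int), Dom_pick_chart_types_py archetype count seed → Spec_pick_chart_types_py archetype count seed (pick_chart_types_py archetype count seed)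

-- ===== LEMMAS AND PROOFS =====

-- every pool the dict lookup can produce has distinct entries and is nonempty
lemma pvPool_ok (archetype : String) : (pvPool archetype).Nodup ∧ pvPool archetype ≠ [] := by
  unfold pvPool pvPools
  simp only [PySem.Dict.getD, PySem.Dict.get?_mk_cons]
  split_ifs <;> simp_all [PySem.Dict.get?]

-- dedupA processes a concatenation in two stages
lemma dedupA_append (acc xs ys : List String) :
    dedupA acc (xs ++ ys) = dedupA (dedupA acc xs) ys := by
  induction xs generalizing acc with
  | nil => rfl
  | cons x xs ih => simp [dedupA, ih]

-- dedupA is the identity on input that is duplicate-free relative to the accumulator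
lemma dedupA_nodup (acc xs : List String) (h : (acc ++ xs).Nodup) :
    dedupA acc xs = acc ++ xs := by
  induction xs generalizing acc with
  | nil => simp [dedupA]
  | cons x xs ih =>
    have h' := h
    rw [List.nodup_append] at h'
    have hx : x ∉ acc := fun hmem => h'.2.2 x hmem x (by simp) rfl
    rw [dedupA, if_neg hx, ih _ (by simpa using h)]
    simp

-- dedupA drops everything already seen
lemma dedupA_subset (acc ys : List String) (h : ∀ y ∈ ys, y ∈ acc) :
    dedupA acc ys = acc := by
  induction ys with
  | nil => rfl
  | cons y ys ih =>
    rw [dedupA, if_pos (h y (by simp))]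
    exact ih fun z hz => h z (by simp [hz])

-- reading the pool cyclically from offset t is reading the rotated pool cyclically from 0
lemma rot_read (pool : List String) (t : Nat) (ht : t < pool.length) (j : Nat) :
    ((pool.drop t ++ pool.take t)[j % pool.length]?).getD "" =
      (pool[(t + j) % pool.length]?).getD "" := by
  set n := pool.length with hn
  have hn0 : 0 < n := by omega
  have hdl : (pool.drop t).length = n - t := by simp [hn]
  have hr : j % n < n := Nat.mod_lt _ hn0
  have htm : t % n = t := Nat.mod_eq_of_lt ht
  by_cases hc : j % n < n - t
  · rw [List.getElem?_append_left (by omega), List.getElem?_drop]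
    have : (t + j) % n = t + j % n := by
      conv_lhs => rw [Nat.add_mod, htm, Nat.mod_eq_of_lt (by omega : t + j % n < n)]
    rw [this]
  · rw [List.getElem?_append_right (by omega), hdl]
    have htk : j % n - (n - t) < t := by omega
    rw [List.getElem?_take_of_lt htk]
    have : (t + j) % n = j % n - (n - t) := by
      conv_lhs => rw [Nat.add_mod, htm]
      have h1 : t + j % n - n < n := by omega
      have h2 : t + j % n = (t + j % n - n) + 1 * n := by omega
      rw [h2, Nat.add_mul_mod_self_right, Nat.mod_eq_of_lt h1]
      omega
    rw [this]

-- the cons-form of A's loop, used only in the proofs below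
def pickConsA (pool : List String) (idx : Int) : Nat → List String
  | 0 => []
  | m + 1 => PySem.List.pyGetD pool (PySem.Int.mod idx (PySem.List.len pool)) ""
               :: pickConsA pool (idx + 1) m

-- the tail-recursive loop accumulates the cons-form reversed
lemma pickLoopA_eq_cons (pool : List String) :
    ∀ (m : Nat) (idx : Int) (res : List String),
      pickLoopA pool idx m res = (pickConsA pool idx m).reverse ++ res := by
  intro m
  induction m with
  | zero => intro idx res; simp [pickLoopA, pickConsA]
  | succ m ih => intro idx res; rw [pickLoopA, ih, pickConsA]; simp

-- A's loop produces the cyclic reads of the rotated pool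
lemma pickConsA_eq (pool : List String) (s : Int) (hs0 : 0 ≤ s) (hs1 : s < pool.length) :
    ∀ (m j : Nat), pickConsA pool (s + j) m =
      (List.range m).map (fun i =>
        ((pool.drop s.toNat ++ pool.take s.toNat)[(j + i) % pool.length]?).getD "") := by
  intro m
  induction m with
  | zero => intro j; simp [pickConsA]
  | succ m ih =>
    intro j
    have hn0 : 0 < pool.length := by omega
    rw [List.range_succ_eq_map, List.map_cons, pickConsA]
    congr 1
    · -- head
      have hmod : PySem.Int.mod (s + j) (PySem.List.len pool) =
          ((s.toNat + j) % pool.length : Nat) := by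
        rw [PySem.List.len_eq, PySem.Int.mod_eq_emod_of_pos (by exact_mod_cast hn0)]
        have : s + (j : Int) = ((s.toNat + j : Nat) : Int) := by omega
        rw [this]
        norm_cast
      rw [hmod, PySem.List.pyGetD_natCast, List.getD_eq_getElem?_getD]
      rw [Nat.add_zero]
      exact (rot_read pool s.toNat (by omega) j).symm
    · -- tail
      have : s + (j : Int) + 1 = s + ((j + 1 : Nat) : Int) := by push_cast; ring
      rw [this, ih (j + 1)]
      simp only [List.map_map]
      apply List.map_congr_left
      intro i _
      simp only [Function.comp]
      have h3 : j + (i + 1) = j + 1 + i := by omega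
      rw [Nat.succ_eq_add_one, h3]

-- dedup of m cyclic reads of a duplicate-free list is its first min(m, length) entries
lemma dedup_cyclic (rot : List String) (hnd : rot.Nodup) (hne : rot ≠ []) (m : Nat) :
    dedupA [] ((List.range m).map fun i => (rot[i % rot.length]?).getD "") = rot.take m := by
  set n := rot.length with hn
  have hn0 : 0 < n := List.length_pos_of_ne_nil hne
  have hfirst : ∀ p ≤ n, ((List.range p).map fun i => (rot[i % n]?).getD "") = rot.take p := by
    intro p hp
    apply List.ext_getElem
    · simp [hn]; omega
    · intro i h1 h2
      simp only [List.getElem_map, List.getElem_range, List.getElem_take]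
      have hi : i < p := by simpa using h1
      rw [Nat.mod_eq_of_lt (by omega)]
      rw [List.getElem?_eq_getElem (by omega)]
      rfl
  by_cases hm : m ≤ n
  · rw [hfirst m hm]
    exact dedupA_nodup [] _ (by simpa using hnd.sublist (List.take_sublist m rot))
  · have hsplit : m = n + (m - n) := by omega
    rw [hsplit, List.range_add, List.map_append, dedupA_append]
    rw [hfirst n le_rfl, List.take_length]
    have hid : dedupA [] rot = rot := by simpa using dedupA_nodup [] rot (by simpa using hnd)
    rw [hid, dedupA_subset]
    · rw [List.take_of_length_le (by omega)]
    · intro y hy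
      simp only [List.mem_map, List.mem_range] at hy
      obtain ⟨i, -, hy⟩ := hy
      have hlt : i % n < n := Nat.mod_lt _ hn0
      rw [List.getElem?_eq_getElem (show i % n < rot.length from by rw [← hn]; exact hlt)] at hy
      rw [← hy]
      exact List.getElem_mem _

-- ===== VERDICT (by name: the statement is the Claim_ definition above) =====
theorem pick_chart_types_py_spec : Claim_equal_pick_chart_types_py := by
  unfold Claim_equal_pick_chart_types_py
  intro archetype count seed _
  unfold Spec_pick_chart_types_py pick_chart_types_py pick_chart_types_py_alt
  dsimp only
  obtain ⟨hnd, hne⟩ := pvPool_ok archetype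
  set pool := pvPool archetype with hpool
  have hn0 : 0 < pool.length := List.length_pos_of_ne_nil hne
  have hn0' : (0 : Int) < PySem.List.len pool := by simp [PySem.List.len_eq]; exact_mod_cast hn0
  rw [if_neg hne]
  set s := PySem.Int.mod seed (PySem.List.len pool) with hs
  have hs0 : 0 ≤ s := PySem.Int.mod_nonneg _ hn0'
  have hs1 : s < pool.length := by
    have := PySem.Int.mod_lt seed hn0'
    simpa [PySem.List.len_eq, ← hs] using this
  set t := s.toNat with htdef
  have hts : s = (t : Int) := by omega
  set rot := pool.drop t ++ pool.take t with hrot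
  have hrotlen : rot.length = pool.length := by simp [hrot]; omega
  have hrotnd : rot.Nodup := by
    have : rot.Perm pool := by
      rw [hrot]
      have h1 : (pool.drop t ++ pool.take t).Perm (pool.take t ++ pool.drop t) := List.perm_append_comm
      simpa [List.take_append_drop] using h1
    exact this.nodup_iff.mpr hnd
  have hrotne : rot ≠ [] := by
    intro h; rw [h] at hrotlen; simp at hrotlen; omega
  -- A side
  have hm1 : 1 ≤ max 1 count := le_max_left _ _
  rw [pickLoopA_eq_cons pool (max 1 count).toNat s []]
  have hAeq := pickConsA_eq pool s hs0 hs1 (max 1 count).toNat 0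
  rw [show s + ((0 : Nat) : Int) = s by simp] at hAeq
  rw [List.append_nil, List.reverse_reverse, hAeq]
  have hA : dedupA [] ((List.range (max 1 count).toNat).map fun i =>
      ((pool.drop t ++ pool.take t)[(0 + i) % pool.length]?).getD "") = rot.take (max 1 count).toNat := by
    rw [← hrot]
    have : ∀ i : Nat, (0 + i) % pool.length = i % rot.length := fun i => by rw [Nat.zero_add, hrotlen]
    simp only [this]
    exact dedup_cyclic rot hrotnd hrotne _
  rw [hA]
  -- B side
  rw [PySem.List.slice_from _ hs0, PySem.List.slice_to _ hs0, ← htdef, ← hrot]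
  have hk0 : (0 : Int) ≤ min (max 1 count) (PySem.List.len pool) :=
    le_min (le_trans (by omega) (le_max_left 1 count)) (le_of_lt hn0')
  rw [PySem.List.slice_to _ hk0]
  have hkt : (min (max 1 count) (PySem.List.len pool)).toNat = min (max 1 count).toNat pool.length := by
    simp [PySem.List.len_eq]
    omega
  rw [hkt]
  by_cases hle : (max 1 count).toNat ≤ pool.length
  · rw [Nat.min_eq_left hle]
  · rw [Nat.min_eq_right (by omega), List.take_of_length_le (by omega),
      List.take_of_length_le (by omega)]
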